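-- pv_equiv track=rewrite | github.com/Marklism/driver-bot | bot.py | replay_scan_delta_km
-- ===== SOURCE A (Python) =====
-- def replay_scan_delta_km(rows):
--     '''
--     Scan fuel/odo rows and report anomalies where:
--     delta_km != current_odo - previous_odo
--     READ-ONLY, no mutation.
--     '''
--     issues = []
--     prev_odo = None
--     for i, r in enumerate(rows):
--         odo = r.get("odo")
--         delta = r.get("delta_km")
--         if odo is None:
--             continue
--         if prev_odo is not None:
--             expected = odo - prev_odo
--             if delta != expected:
--                 issues.append({
--                     "row": i,
--                     "odo": odo,
--                     "delta_km": delta,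
--                     "expected": expected,
--                 })
--         prev_odo = odo
--     return issues
-- ===== SOURCE B (Python) =====
-- def _prev_odo(rows, i):
--     # Nearest earlier row with an odometer reading, by backward search.
--     for j in range(i - 1, -1, -1):
--         o = rows[j].get("odo")
--         if o is not None:
--             return o
--     return None
--
--
-- def replay_scan_delta_km(rows):
--     # Stateless per-row check: for every row with an odometer reading, find the
--     # previous odometer reading by searching backwards from that row, instead of
--     # threading a prev_odo state through one forward pass.
--     issues = []
--     for i, r in enumerate(rows):
--         odo = r.get("odo")
--         if odo is None:
--             continue
--         prev = _prev_odo(rows, i)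
--         if prev is None:
--             continue
--         expected = odo - prev
--         delta = r.get("delta_km")
--         if delta != expected:
--             issues.append({
--                 "row": i,
--                 "odo": odo,
--                 "delta_km": delta,
--                 "expected": expected,
--             })
--     return issues
-- ===== Notes on version B (the rewrite author's own statement) =====
-- stated objective: alternative
-- what changed: Replaces A's single forward pass that threads a prev_odo state across skipped rows with a stateless per-row check: for each row carrying an odometer value, the previous odometer reading is found by a backward search from that row (nested scan instead of state threading).
import Mathlib
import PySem

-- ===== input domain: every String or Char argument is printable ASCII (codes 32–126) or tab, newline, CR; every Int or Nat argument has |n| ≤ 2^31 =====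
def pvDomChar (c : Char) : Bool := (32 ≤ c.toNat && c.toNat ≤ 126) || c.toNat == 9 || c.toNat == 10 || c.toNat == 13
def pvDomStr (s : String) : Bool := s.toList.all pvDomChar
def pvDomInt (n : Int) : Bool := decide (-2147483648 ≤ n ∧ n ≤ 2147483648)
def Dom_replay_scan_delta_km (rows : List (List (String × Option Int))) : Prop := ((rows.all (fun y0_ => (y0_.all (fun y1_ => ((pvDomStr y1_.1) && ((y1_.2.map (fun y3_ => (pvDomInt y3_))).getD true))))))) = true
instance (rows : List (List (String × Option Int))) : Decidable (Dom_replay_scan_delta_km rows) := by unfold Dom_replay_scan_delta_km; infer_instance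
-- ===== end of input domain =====

-- B replaces A's forward pass threading a prev_odo state by a stateless per-row
-- check that finds each row's previous odometer reading by backward search
-- (alternative decomposition; O(n^2) worst case vs A's O(n); read-only like A).

-- r.get(k): first matching key's stored value (a missing key and a stored None both give none)
def pyGetRow (r : List (String × Option Int)) (k : String) : Option Int :=
  match r.find? (fun p => p.1 == k) with
  | some p => p.2
  | none => none

-- ===== PORT A =====
-- the loop over enumerate(rows) with state (issues, prev_odo); under Pre_ the delta
-- appended to an issue is never none, so `.getD 0` there is never the default
def goA : List (Int × List (String × Option Int)) → List (List (String × Int)) → Option Int →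
    List (List (String × Int))
  | [], issues, _ => issues
  | (i, r) :: rest, issues, prev_odo =>
    let odo := pyGetRow r "odo"
    let delta := pyGetRow r "delta_km"
    match odo with
    | none => goA rest issues prev_odo
    | some o =>
      match prev_odo with
      | none => goA rest issues (some o)
      | some p =>
        let expected := o - p
        if delta ≠ some expected then
          goA rest (issues ++ [[("row", i), ("odo", o), ("delta_km", delta.getD 0), ("expected", expected)]]) (some o)
        else
          goA rest issues (some o)

def replay_scan_delta_km (rows : List (List (String × Option Int))) : List (List (String × Int)) :=
  goA (PySem.List.enumerate rows) [] none

-- ===== PORT B =====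
-- _prev_odo(rows, i): the backward for-loop over range(i-1,-1,-1); Python's rows[j]
-- only sees in-range nonnegative j, so plain getElem? is exact here
def backScan (rows : List (List (String × Option Int))) : Nat → Option Int
  | 0 => none
  | k+1 =>
    match rows[k]? with
    | some r =>
      match pyGetRow r "odo" with
      | some o => some o
      | none => backScan rows k
    | none => backScan rows k

-- the body of B's loop for one enumerated row; `.getD 0` as in port A (never the default under Pre_)
def bodyB (rows : List (List (String × Option Int))) (ir : Int × List (String × Option Int)) :
    Option (List (String × Int)) :=
  match pyGetRow ir.2 "odo" with
  | none => none
  | some o =>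
    match backScan rows ir.1.toNat with
    | none => none
    | some p =>
      let expected := o - p
      if pyGetRow ir.2 "delta_km" ≠ some expected then
        some [("row", ir.1), ("odo", o), ("delta_km", (pyGetRow ir.2 "delta_km").getD 0), ("expected", expected)]
      else none

def replay_scan_delta_km_alt (rows : List (List (String × Option Int))) : List (List (String × Int)) :=
  (PySem.List.enumerate rows).filterMap (bodyB rows)

-- ===== PRECONDITION & SPEC =====
-- Pre_ excludes exactly the inputs where an issue dict would carry "delta_km": None
-- (a row with an odo but no delta_km value, preceded by some row with an odo): A and
-- B (the Pythons) agree there and both return that dict, but None is not an Int, so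
-- the value is not representable in the declared return type List (String × Int).
def Pre_replay_scan_delta_km (rows : List (List (String × Option Int))) : Prop :=
  ∀ p ∈ rows.zipIdx, pyGetRow p.1 "odo" ≠ none → pyGetRow p.1 "delta_km" = none →
    ∀ q ∈ rows.zipIdx, q.2 < p.2 → pyGetRow q.1 "odo" = none
instance (rows : List (List (String × Option Int))) : Decidable (Pre_replay_scan_delta_km rows) := by
  unfold Pre_replay_scan_delta_km; infer_instance

def pvWitness_replay_scan_delta_km : (List (List (String × Option Int))) :=
  [[("odo", some 0), ("delta_km", some 1)], [("odo", some 5), ("delta_km", some 4)]]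

def Spec_replay_scan_delta_km (rows : List (List (String × Option Int))) (out : List (List (String × Int))) : Prop := out = replay_scan_delta_km_alt rows
instance (rows : List (List (String × Option Int))) (out : List (List (String × Int))) : Decidable (Spec_replay_scan_delta_km rows out) := by unfold Spec_replay_scan_delta_km; infer_instance

-- ===== CLAIM (what is proved, stated in full; the proofs are below) =====
def Claim_equal_replay_scan_delta_km : Prop := ∀ (rows : List (List (String × Option Int))), Dom_replay_scan_delta_km rows → Pre_replay_scan_delta_km rows → Spec_replay_scan_delta_km rows (replay_scan_delta_km rows)

-- ===== LEMMAS AND PROOFS =====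

-- backScan only reads indices below k, so a suffix appended after them is invisible
theorem backScan_append (pre rest : List (List (String × Option Int))) :
    ∀ k, k ≤ pre.length → backScan (pre ++ rest) k = backScan pre k := by
  intro k
  induction k with
  | zero => intro _; rfl
  | succ k ih =>
    intro hk
    have hlt : k < pre.length := Nat.lt_of_succ_le hk
    have hget : (pre ++ rest)[k]? = pre[k]? := List.getElem?_append_left hlt
    simp only [backScan, hget, ih (Nat.le_of_lt hlt)]

-- appending one row advances backScan exactly as A advances prev_odo
theorem backScan_snoc (pre : List (List (String × Option Int))) (r : List (String × Option Int)) :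
    backScan (pre ++ [r]) (pre.length + 1) =
      match pyGetRow r "odo" with
      | some o => some o
      | none => backScan pre pre.length := by
  have hget : (pre ++ [r])[pre.length]? = some r := by
    simp
  simp only [backScan, hget, backScan_append pre [r] pre.length (Nat.le_refl _)]

-- the loop invariant: A's remaining loop from state (issues, backScan pre |pre|)
-- equals issues ++ B's stateless pass over the remaining enumerated rows
theorem main_inv (suf : List (List (String × Option Int))) :
    ∀ (pre : List (List (String × Option Int))) (issues : List (List (String × Int))),
    goA (PySem.List.enumerate suf (pre.length : Int)) issues (backScan pre pre.length)
      = issues ++ (PySem.List.enumerate suf (pre.length : Int)).filterMap (bodyB (pre ++ suf)) := by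
  induction suf with
  | nil => intro pre issues; simp [PySem.List.enumerate, goA]
  | cons r suf' ih =>
    intro pre issues
    have hlen : ((pre.length : Int) + 1) = (((pre ++ [r]).length : Nat) : Int) := by
      simp
    have hrows : (pre ++ [r]) ++ suf' = pre ++ r :: suf' := by simp
    have hbody_head : bodyB (pre ++ r :: suf') ((pre.length : Int), r) =
        match pyGetRow r "odo" with
        | none => none
        | some o =>
          match backScan pre pre.length with
          | none => none
          | some p =>
            if pyGetRow r "delta_km" ≠ some (o - p) then
              some [("row", (pre.length : Int)), ("odo", o), ("delta_km", (pyGetRow r "delta_km").getD 0), ("expected", o - p)]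
            else none := by
      simp only [bodyB, Int.toNat_natCast,
        backScan_append pre (r :: suf') pre.length (Nat.le_refl _)]
    rw [PySem.List.enumerate_cons]
    have hl : (pre ++ [r]).length = pre.length + 1 := by simp
    rcases ho : pyGetRow r "odo" with _ | o
    · -- odo is None: row skipped on both sides, state unchanged
      have hhead : bodyB (pre ++ r :: suf') ((pre.length : Int), r) = none := by
        simp only [hbody_head, ho]
      have hb : backScan (pre ++ [r]) ((pre ++ [r]).length) = backScan pre pre.length := by
        rw [hl, backScan_snoc pre r, ho]
      simp only [goA, ho, List.filterMap_cons, hhead]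
      rw [hlen, ← hb, ih (pre ++ [r]) issues, hrows]
    · rcases hp : backScan pre pre.length with _ | p
      · -- first odometer row: seeds the state, produces no issue
        have hhead : bodyB (pre ++ r :: suf') ((pre.length : Int), r) = none := by
          simp only [hbody_head, ho, hp]
        have hb : backScan (pre ++ [r]) ((pre ++ [r]).length) = some o := by
          rw [hl, backScan_snoc pre r, ho]
        simp only [goA, ho, List.filterMap_cons, hhead]
        rw [hlen, ← hb, ih (pre ++ [r]) issues, hrows]
      · -- a previous odometer exists: both sides compare delta with o - p
        have hb : backScan (pre ++ [r]) ((pre ++ [r]).length) = some o := by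
          rw [hl, backScan_snoc pre r, ho]
        by_cases hd : pyGetRow r "delta_km" ≠ some (o - p)
        · have hhead : bodyB (pre ++ r :: suf') ((pre.length : Int), r) =
              some [("row", (pre.length : Int)), ("odo", o), ("delta_km", (pyGetRow r "delta_km").getD 0), ("expected", o - p)] := by
            simp only [hbody_head, ho, hp, if_pos hd]
          simp only [goA, ho, if_pos hd, List.filterMap_cons, hhead]
          rw [hlen, ← hb, ih (pre ++ [r]) _, hrows]
          simp [List.append_assoc]
        · have hhead : bodyB (pre ++ r :: suf') ((pre.length : Int), r) = none := by
            simp only [hbody_head, ho, hp, if_neg hd]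
          simp only [goA, ho, if_neg hd, List.filterMap_cons, hhead]
          rw [hlen, ← hb, ih (pre ++ [r]) issues, hrows]

-- ===== VERDICT (by name: the statement is the Claim_ definition above) =====
theorem replay_scan_delta_km_spec : Claim_equal_replay_scan_delta_km := by
  intro rows _ _
  unfold Spec_replay_scan_delta_km replay_scan_delta_km replay_scan_delta_km_alt
  have h := main_inv rows [] []
  simpa [backScan] using h
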